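-- pv_equiv track=rewrite | github.com/NozyZy/Le-ptit-bot | fonctions.py | verifAlphabet
-- ===== SOURCE A (Python) =====
-- def verifAlphabet(string):
--     string = string.lower()
--     for i in range(len(string)):
--         if (i + 3 <= len(string) and len(string) >= 3 and
--             (string[i] == string[i + 1] and string[i] == string[i + 2])):
--             return False
--         if (ord(string[i]) < 97 or 97 + 26 < ord(string[i]) and string[i]
--                 not in ["é", "è", "à", "ï", "ø", "â", "ñ", "î", "û", "ç"]):
--             return False
--     return True
-- ===== SOURCE B (Python) =====
-- # Run-length scan: one pass over maximal runs of equal characters; each run is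
-- # checked once (length < 3, representative char in a precomputed allowed set).
-- # range(97, 124) reproduces A's bound `97 + 26 < ord` exactly (code 123 included).
-- ALLOWED = frozenset(map(chr, range(97, 124))) | frozenset("éèàïøâñîûç")
--
-- def verifAlphabet(string):
--     s = string.lower()
--     i, n = 0, len(s)
--     while i < n:
--         j = i + 1
--         while j < n and s[j] == s[i]:
--             j += 1
--         if j - i >= 3 or s[i] not in ALLOWED:
--             return False
--         i = j
--     return True
-- ===== Notes on version B (the rewrite author's own statement) =====
-- stated objective: alternative
-- what changed: Replaces A's per-index loop (triple check via string[i..i+2] plus ord-range/accent test at every position) with a run-length scan: an outer loop over maximal runs of equal characters, each run checked once for length < 3 and for membership of its representative character in a precomputed allowed set.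
import Mathlib
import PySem

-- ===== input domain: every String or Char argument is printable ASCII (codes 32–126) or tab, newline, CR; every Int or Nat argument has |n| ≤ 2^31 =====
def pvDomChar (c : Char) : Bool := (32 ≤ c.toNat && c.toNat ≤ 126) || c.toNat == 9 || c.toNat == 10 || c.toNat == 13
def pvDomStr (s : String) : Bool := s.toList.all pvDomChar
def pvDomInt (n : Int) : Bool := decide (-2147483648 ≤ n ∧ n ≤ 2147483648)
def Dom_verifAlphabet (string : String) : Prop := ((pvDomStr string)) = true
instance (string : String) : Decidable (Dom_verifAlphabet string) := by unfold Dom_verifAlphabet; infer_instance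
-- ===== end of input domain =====

-- B replaces A's per-index loop (triple check plus ord/accent test at every position) with a
-- run-length scan: an outer loop over maximal runs of equal characters, each run checked once
-- (length < 3, representative char in a precomputed allowed set); objective: alternative.

-- ===== PORT A =====
-- the accented characters whitelisted by A
def pvAccents : List Char := ['é', 'è', 'à', 'ï', 'ø', 'â', 'ñ', 'î', 'û', 'ç']

-- A's `for i in range(len(string))` with early returns, as the standard suffix recursion:
-- at index i the loop sees string[i] (= head) and string[i+1], string[i+2] (= first two of the tail);
-- the guard `i + 3 <= len(string) and len(string) >= 3` is `2 ≤ rest.length` on the suffix.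
def pvALoop : List Char → Bool
  | [] => true
  | c :: rest =>
    if 2 ≤ rest.length ∧ c = rest.getD 0 ' ' ∧ c = rest.getD 1 ' ' then false
    else if c.toNat < 97 ∨ (97 + 26 < c.toNat ∧ c ∉ pvAccents) then false
    else pvALoop rest

def verifAlphabet (string : String) : Bool :=
  pvALoop (PySem.Chars.lower string.toList)

-- ===== PORT B =====
-- ALLOWED = frozenset(map(chr, range(97, 124))) | frozenset("éèàïøâñîûç")
def pvAllowed : List Char :=
  (List.range 27).map (fun i => Char.ofNat (97 + i)) ++ "éèàïøâñîûç".toList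

-- B's outer while loop over maximal runs: the inner `while s[j] == s[i]: j += 1` splits the
-- tail into takeWhile/dropWhile at the first character differing from the head.
def pvRuns : List Char → Bool
  | [] => true
  | c :: t =>
    if 3 ≤ (t.takeWhile (· == c)).length + 1 ∨ c ∉ pvAllowed then false
    else pvRuns (t.dropWhile (· == c))
termination_by l => l.length
decreasing_by
  exact Nat.lt_succ_of_le (List.length_dropWhile_le _ _)

def verifAlphabet_alt (string : String) : Bool :=
  pvRuns (PySem.Chars.lower string.toList)

-- ===== PRECONDITION & SPEC =====
def Spec_verifAlphabet (string : String) (out : Bool) : Prop := out = verifAlphabet_alt string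
instance (string : String) (out : Bool) : Decidable (Spec_verifAlphabet string out) := by unfold Spec_verifAlphabet; infer_instance

-- ===== CLAIM (what is proved, stated in full; the proofs are below) =====
def Claim_equal_verifAlphabet : Prop := ∀ (string : String), Dom_verifAlphabet string → Spec_verifAlphabet string (verifAlphabet string)

-- ===== LEMMAS AND PROOFS =====

-- the range part of the allowed set is exactly the character codes 97..123
lemma pvMemRange (c : Char) :
    (c ∈ (List.range 27).map (fun i => Char.ofNat (97 + i))) ↔ (97 ≤ c.toNat ∧ c.toNat ≤ 123) := by
  simp only [List.mem_map, List.mem_range]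
  constructor
  · rintro ⟨i, hi, rfl⟩
    rw [Char.toNat_ofNat, if_pos (by simp [Nat.isValidChar]; omega)]
    omega
  · rintro ⟨h1, h2⟩
    exact ⟨c.toNat - 97, by omega,
      by rw [show 97 + (c.toNat - 97) = c.toNat by omega, Char.ofNat_toNat]⟩

lemma pvAccStr : "éèàïøâñîûç".toList = pvAccents := by decide

lemma pvAccBig (c : Char) (h : c ∈ pvAccents) : 123 < c.toNat := by
  fin_cases h <;> decide

-- A's bad-character test is the negation of membership in B's allowed set
lemma pvBad_iff (c : Char) :
    (c.toNat < 97 ∨ (97 + 26 < c.toNat ∧ c ∉ pvAccents)) ↔ c ∉ pvAllowed := by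
  by_cases hm : c ∈ pvAccents
  · have h123 := pvAccBig c hm
    simp [pvAllowed, pvAccStr, hm]
    omega
  · simp [pvAllowed, pvAccStr, hm, pvMemRange]
    omega

lemma pvRuns_nil : pvRuns [] = true := by rw [pvRuns]

lemma pvALoop_bad (c : Char) (t : List Char) (h : c ∉ pvAllowed) :
    pvALoop (c :: t) = false := by
  have hb := (pvBad_iff c).mpr h
  simp only [pvALoop]
  split_ifs <;> simp_all

lemma pvRuns_cons (c : Char) (t : List Char) :
    pvRuns (c :: t) =
      if 3 ≤ (t.takeWhile (· == c)).length + 1 ∨ c ∉ pvAllowed then false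
      else pvRuns (t.dropWhile (· == c)) := by
  rw [pvRuns]

-- the per-index loop equals the run-length scan
lemma pvKey : ∀ (n : ℕ) (l : List Char), l.length ≤ n → pvALoop l = pvRuns l := by
  intro n
  induction n with
  | zero =>
    intro l hl
    interval_cases h : l.length
    · rw [List.length_eq_zero_iff] at h; subst h; rw [pvRuns_nil]; rfl
  | succ n ih =>
    intro l hl
    match l with
    | [] => rw [pvRuns_nil]; rfl
    | [c] =>
      rw [pvRuns_cons]
      by_cases hm : c ∈ pvAllowed
      · have hb := (not_iff_not.mpr (pvBad_iff c)).mpr (by simpa using hm)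
        simp [pvALoop, hm, hb, pvRuns]
      · simp [pvALoop_bad c _ hm, hm]
    | c :: b :: t' =>
      by_cases hbc : b = c
      · subst hbc
        match t' with
        | [] =>
          rw [pvRuns_cons]
          by_cases hm : b ∈ pvAllowed
          · have hb := (not_iff_not.mpr (pvBad_iff b)).mpr (by simpa using hm)
            simp [pvALoop, hm, hb, pvRuns]
          · simp [pvALoop_bad b _ hm, hm]
        | d :: t'' =>
          by_cases hd : d = b
          · subst hd
            rw [pvRuns_cons]
            have : pvALoop (d :: d :: d :: t'') = false := by
              simp [pvALoop]
            simp [this]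
          · -- head run has length 2
            rw [pvRuns_cons]
            have htw : (b :: d :: t'').takeWhile (· == b) = [b] := by
              simp [hd]
            have hdw : (b :: d :: t'').dropWhile (· == b) = d :: t'' := by
              simp [hd]
            rw [htw, hdw]
            by_cases hm : b ∈ pvAllowed
            · have hb := (not_iff_not.mpr (pvBad_iff b)).mpr (by simpa using hm)
              have e1 : pvALoop (b :: b :: d :: t'') = pvALoop (b :: d :: t'') := by
                simp [pvALoop, hb, Ne.symm hd]
              have e2 : pvALoop (b :: d :: t'') = pvALoop (d :: t'') := by
                simp [pvALoop, hb, Ne.symm hd]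
              rw [e1, e2, if_neg (by simp [hm]), ih _ (by simp at hl ⊢; omega)]
            · simp [pvALoop_bad b _ hm, hm]
      · -- head run has length 1
        rw [pvRuns_cons]
        have htw : (b :: t').takeWhile (· == c) = [] := by
          simp [hbc]
        have hdw : (b :: t').dropWhile (· == c) = b :: t' := by
          simp [hbc]
        rw [htw, hdw]
        by_cases hm : c ∈ pvAllowed
        · have hb := (not_iff_not.mpr (pvBad_iff c)).mpr (by simpa using hm)
          have e1 : pvALoop (c :: b :: t') = pvALoop (b :: t') := by
            simp [pvALoop, hb, Ne.symm hbc]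
          rw [e1, if_neg (by simp [hm]), ih _ (by simpa using hl)]
        · simp [pvALoop_bad c _ hm, hm]

-- ===== VERDICT (by name: the statement is the Claim_ definition above) =====
theorem verifAlphabet_spec : Claim_equal_verifAlphabet := by
  intro string _
  unfold Spec_verifAlphabet verifAlphabet verifAlphabet_alt
  exact pvKey _ _ (Nat.le_refl _)
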